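-- pv_equiv track=rewrite | github.com/MECEN-TOURS/SC-2020-2021 | Seance11/auxiliaire.py | reduit_espaces
-- ===== SOURCE A (Python) =====
-- def reduit_espaces(texte: str) -> str:
--     """Remplace les suites d'espaces par un seul espace.
--
--
--     TODO: EXEMPLE
--     """
--     resultat = list()
--     for caractere in texte:
--         if caractere != " ":
--             resultat.append(caractere)
--         else:
--             try:
--                 if resultat[-1] != " ":
--                     resultat.append(caractere)
--             except IndexError:
--                 resultat.append(caractere)
--     return "".join(resultat)
-- ===== SOURCE B (Python) =====
-- from itertools import groupby
--
--
-- def reduit_espaces(texte: str) -> str: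
--     """Remplace les suites d'espaces par un seul espace."""
--     return "".join(" " if c == " " else "".join(g) for c, g in groupby(texte))
-- ===== Notes on version B (the rewrite author's own statement) =====
-- stated objective: idiomatic
-- what changed: B walks maximal runs of identical characters with itertools.groupby, emitting one space per space-run and each other run verbatim, instead of appending char-by-char while inspecting the last appended character.
import Mathlib
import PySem

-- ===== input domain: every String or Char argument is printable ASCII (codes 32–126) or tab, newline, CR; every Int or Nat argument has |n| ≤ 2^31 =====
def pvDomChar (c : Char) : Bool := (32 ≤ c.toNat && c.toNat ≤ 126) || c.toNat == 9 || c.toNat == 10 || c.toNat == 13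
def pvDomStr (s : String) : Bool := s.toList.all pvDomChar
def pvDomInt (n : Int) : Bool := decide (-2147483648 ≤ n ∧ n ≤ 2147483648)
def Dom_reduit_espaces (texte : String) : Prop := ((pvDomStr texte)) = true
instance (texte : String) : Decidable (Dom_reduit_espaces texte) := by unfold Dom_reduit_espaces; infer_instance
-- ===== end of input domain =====

-- B collapses space-runs by grouping maximal runs of identical characters (itertools.groupby style)
-- instead of A's char-by-char append that inspects the last appended character; objective: idiomatic.


-- ===== PORT A =====
-- one loop step of A: append caractere unless resultat[-1] is already a space
def reduitStep (resultat : List Char) (caractere : Char) : List Char :=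
  if caractere ≠ ' ' then resultat ++ [caractere]
  else
    match PySem.List.pyGet? resultat (-1) with
    | some last => if last ≠ ' ' then resultat ++ [caractere] else resultat
    | none => resultat ++ [caractere]   -- IndexError branch

def reduit_espaces (texte : String) : String :=
  String.ofList (texte.toList.foldl reduitStep [])

-- ===== PORT B =====
-- groupby(texte): emit one piece per maximal run of identical characters
def reduitRuns : List Char → List Char
  | [] => []
  | c :: rest =>
    (if c = ' ' then [' '] else c :: rest.takeWhile (· == c)) ++ reduitRuns (rest.dropWhile (· == c))
termination_by l => l.length
decreasing_by
  exact Nat.lt_succ_of_le (List.length_dropWhile_le _ _)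

def reduit_espaces_alt (texte : String) : String :=
  String.ofList (reduitRuns texte.toList)

-- ===== PRECONDITION & SPEC =====
def Spec_reduit_espaces (texte : String) (out : String) : Prop := out = reduit_espaces_alt texte
instance (texte : String) (out : String) : Decidable (Spec_reduit_espaces texte out) := by unfold Spec_reduit_espaces; infer_instance

-- ===== CLAIM (what is proved, stated in full; the proofs are below) =====
def Claim_equal_reduit_espaces : Prop := ∀ (texte : String), Dom_reduit_espaces texte → Spec_reduit_espaces texte (reduit_espaces texte)

-- ===== LEMMAS AND PROOFS =====

-- A's loop rephrased with a boolean state "the last appended character is a space"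
def aGo (prevSpace : Bool) : List Char → List Char
  | [] => []
  | c :: cs =>
    if c ≠ ' ' then c :: aGo false cs
    else if prevSpace then aGo true cs
    else ' ' :: aGo true cs

lemma foldl_eq_aGo (l : List Char) : ∀ (acc : List Char),
    l.foldl reduitStep acc = acc ++ aGo (PySem.List.pyGet? acc (-1) == some ' ') l := by
  induction l with
  | nil => intro acc; simp [aGo]
  | cons c cs ih =>
    intro acc
    have hlast : ∀ (xs : List Char) (x : Char),
        PySem.List.pyGet? (xs ++ [x]) (-1) = some x := by
      intro xs x
      simp [PySem.List.pyGet?, PySem.List.pyIdx?]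
    by_cases hc : c = ' '
    · subst hc
      by_cases hp : PySem.List.pyGet? acc (-1) = some ' '
      · have hstep : reduitStep acc ' ' = acc := by
          simp [reduitStep, hp]
        simp only [List.foldl_cons, hstep]
        rw [ih acc]
        simp [hp, aGo]
      · have hstep : reduitStep acc ' ' = acc ++ [' '] := by
          simp only [reduitStep, ne_eq, not_true_eq_false, if_false]
          cases h : PySem.List.pyGet? acc (-1) with
          | none => simp
          | some last =>
            have : last ≠ ' ' := by intro he; exact hp (he ▸ h)
            simp [this]
        simp only [List.foldl_cons, hstep]
        rw [ih (acc ++ [' '])]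
        have hp' : (PySem.List.pyGet? acc (-1) == some ' ') = false := by
          simpa using hp
        simp [hlast, aGo, hp']
    · have hstep : reduitStep acc c = acc ++ [c] := by simp [reduitStep, hc]
      simp only [List.foldl_cons, hstep]
      rw [ih (acc ++ [c])]
      have h2 : (PySem.List.pyGet? (acc ++ [c]) (-1) == some ' ') = false := by
        simp [hlast]; exact hc
      rw [h2]
      have h3 : ((PySem.List.pyGet? acc (-1) == some ' ') = true) ∨ ((PySem.List.pyGet? acc (-1) == some ' ') = false) := by
        cases PySem.List.pyGet? acc (-1) == some ' ' <;> simp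
      simp [aGo, hc]

-- aGo skips over further spaces when the state is "just emitted a space"
lemma aGo_true_spaces (l : List Char) (h : ∀ x ∈ l, x = ' ') (rest : List Char) :
    aGo true (l ++ rest) = aGo true rest := by
  induction l with
  | nil => rfl
  | cons c cs ih =>
    have hc : c = ' ' := h c (by simp)
    subst hc
    simp only [List.cons_append, aGo, ne_eq, not_true_eq_false, if_false, if_true]
    exact ih (fun x hx => h x (by simp [hx]))

-- aGo copies a nonempty run of non-space characters verbatim, ending in state false
lemma aGo_nonspace (b : Bool) (l : List Char) (h : ∀ x ∈ l, x ≠ ' ') (rest : List Char)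
    (hne : l ≠ []) : aGo b (l ++ rest) = l ++ aGo false rest := by
  induction l generalizing b with
  | nil => exact absurd rfl hne
  | cons c cs ih =>
    have hc : c ≠ ' ' := h c (by simp)
    simp only [List.cons_append, aGo, hc, ne_eq, not_false_eq_true, if_true]
    cases cs with
    | nil => simp
    | cons d ds =>
      rw [ih false (fun x hx => h x (by simp [hx])) (by simp)]

-- state true behaves like state false when the next character is not a space
lemma aGo_true_eq_false (l : List Char) (h : ∀ x, l.head? = some x → x ≠ ' ') :
    aGo true l = aGo false l := by
  cases l with
  | nil => rfl
  | cons c cs =>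
    have hc : c ≠ ' ' := h c rfl
    simp [aGo, hc]

lemma aGo_false_eq_runs (l : List Char) : aGo false l = reduitRuns l := by
  induction l using reduitRuns.induct with
  | case1 => rw [reduitRuns]; rfl
  | case2 c rest ih =>
    have hsplit : rest = rest.takeWhile (· == c) ++ rest.dropWhile (· == c) :=
      (List.takeWhile_append_dropWhile).symm
    by_cases hc : c = ' '
    · subst hc
      rw [reduitRuns]
      simp only [if_true]
      conv_lhs => rw [show (' ' :: rest) = [' '] ++ rest from rfl, hsplit]
      rw [← List.append_assoc]
      have hall : ∀ x ∈ [' '] ++ rest.takeWhile (· == ' '), x = ' ' := by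
        intro x hx
        rcases List.mem_append.mp hx with h | h
        · simpa using h
        · simpa using List.mem_takeWhile_imp h
      have h1 : aGo false (([' '] ++ rest.takeWhile (· == ' ')) ++ rest.dropWhile (· == ' '))
          = ' ' :: aGo true (rest.takeWhile (· == ' ') ++ rest.dropWhile (· == ' ')) := by
        simp [aGo]
      have hhead : ∀ x, (rest.dropWhile (· == ' ')).head? = some x → x ≠ ' ' := by
        intro x hx
        have := List.head?_dropWhile_not (p := (· == ' ')) (l := rest)
        rw [hx] at this
        simpa using this
      rw [h1, aGo_true_spaces _ (fun x hx => by simpa using List.mem_takeWhile_imp hx)]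
      rw [aGo_true_eq_false _ hhead, ih]
      simp
    · rw [reduitRuns]
      simp only [hc, if_false]
      conv_lhs => rw [show (c :: rest) = (c :: rest.takeWhile (· == c)) ++ rest.dropWhile (· == c) by
        rw [List.cons_append, ← hsplit]]
      have hns : ∀ x ∈ c :: rest.takeWhile (· == c), x ≠ ' ' := by
        intro x hx
        rcases List.mem_cons.mp hx with h | h
        · subst h; exact hc
        · have := List.mem_takeWhile_imp h
          simp at this; subst this; exact hc
      rw [aGo_nonspace false _ hns _ (by simp), ih]

-- ===== VERDICT (by name: the statement is the Claim_ definition above) =====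
theorem reduit_espaces_spec : Claim_equal_reduit_espaces := by
  intro texte _
  unfold Spec_reduit_espaces reduit_espaces reduit_espaces_alt
  rw [foldl_eq_aGo]
  simp [PySem.List.pyGet?, PySem.List.pyIdx?, aGo_false_eq_runs]
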